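-- pv_equiv track=rewrite | github.com/oanaipopescu/adaptive_endogenous_contexts | endogenous_contexts_simulation_study/generate_data.py | process_graph_entries
-- ===== SOURCE A (Python) =====
-- def process_graph_entries(entries):
--     """
--     Processes entries in the graph to determine the type of connection.
--
--     Parameters:
--     - entries (list): List of graph entries to process.
--
--     Returns:
--     - str: Processed value for the graph entries.
--     """
--     # Remove empty strings from the list
--     filtered_entries = [entry for entry in entries if entry != '']
--
--     # Check if the filtered list is empty
--     if len(filtered_entries) == 0:
--         return ''
--
--     # Check if all entries in the list are the same
--     if all(entry == filtered_entries[0] for entry in filtered_entries):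
--         return filtered_entries[0]
--
--     # Check if there are different entries in the list
--     if set(filtered_entries) == {'<--', '-->'}:
--         return '<-->'
--
--     if any([entry == 'o-o' for entry in filtered_entries]):
--         return 'o-o'
--
--     if any([entry == 'x-x' for entry in filtered_entries]):
--         return 'x-x'
-- ===== SOURCE B (Python) =====
-- def process_graph_entries(entries):
--     # Single left-to-right pass with an accumulator: track the first non-empty
--     # value, whether all non-empty values equal it, and flags for the marks
--     # '<--', '-->', 'o-o', 'x-x' and for any other value; dispatch at the end.
--     first = None
--     allsame = True
--     has_lt = has_rt = has_other = has_oo = has_xx = False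
--     for e in entries:
--         if e == '':
--             continue
--         if first is None:
--             first = e
--         elif e != first:
--             allsame = False
--         if e == '<--':
--             has_lt = True
--         elif e == '-->':
--             has_rt = True
--         else:
--             has_other = True
--             if e == 'o-o':
--                 has_oo = True
--             elif e == 'x-x':
--                 has_xx = True
--     if first is None:
--         return ''
--     if allsame:
--         return first
--     if has_lt and has_rt and not has_other:
--         return '<-->'
--     if has_oo:
--         return 'o-o'
--     if has_xx:
--         return 'x-x'
-- ===== Notes on version B (the rewrite author's own statement) =====
-- stated objective: alternative
-- what changed: B is a single left-to-right pass with an accumulator (first value, all-same flag, boolean flags for each mark and for 'other') and a final dispatch, replacing A's staged passes (filter list build, all(), set construction and equality, two any() list-comprehension scans).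
import Mathlib
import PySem

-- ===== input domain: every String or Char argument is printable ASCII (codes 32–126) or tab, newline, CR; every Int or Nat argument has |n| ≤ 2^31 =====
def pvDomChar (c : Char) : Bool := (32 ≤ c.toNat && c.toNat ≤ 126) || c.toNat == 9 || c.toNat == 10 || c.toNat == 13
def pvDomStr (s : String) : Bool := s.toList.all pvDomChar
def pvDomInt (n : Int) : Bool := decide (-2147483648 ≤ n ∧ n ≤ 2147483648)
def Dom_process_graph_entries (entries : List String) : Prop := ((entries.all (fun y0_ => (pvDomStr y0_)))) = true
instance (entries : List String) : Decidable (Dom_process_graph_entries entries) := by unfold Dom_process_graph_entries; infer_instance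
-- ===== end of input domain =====

-- B replaces A's staged passes (filter, all(), set equality, two any() scans) by ONE
-- left-to-right pass with an accumulator record and a final dispatch; objective: alternative.

-- ===== PORT A =====
def process_graph_entries (entries : List String) : Option String :=
  let filtered := entries.filter (fun e => e != "")
  if filtered.length = 0 then some ""
  else if filtered.all (fun e => e == filtered.headD "") then some (filtered.headD "")
  else if PySem.Set.equal (PySem.Set.ofList filtered) (PySem.Set.ofList ["<--", "-->"]) then some "<-->"
  else if filtered.any (fun e => e == "o-o") then some "o-o"
  else if filtered.any (fun e => e == "x-x") then some "x-x"
  else none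

-- ===== PORT B =====
-- accumulator state of B's single pass
structure PgeSt where
  first : Option String
  allsame : Bool
  hlt : Bool
  hrt : Bool
  hoth : Bool
  hoo : Bool
  hxx : Bool
deriving Repr, DecidableEq

def pgeStep (s : PgeSt) (e : String) : PgeSt :=
  if e == "" then s
  else
    let s1 :=
      match s.first with
      | none => { s with first := some e }
      | some f => if e != f then { s with allsame := false } else s
    if e == "<--" then { s1 with hlt := true }
    else if e == "-->" then { s1 with hrt := true }
    else
      let s2 := { s1 with hoth := true }
      if e == "o-o" then { s2 with hoo := true }
      else if e == "x-x" then { s2 with hxx := true }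
      else s2

def process_graph_entries_alt (entries : List String) : Option String :=
  let s := entries.foldl pgeStep ⟨none, true, false, false, false, false, false⟩
  match s.first with
  | none => some ""
  | some f =>
    if s.allsame then some f
    else if s.hlt && s.hrt && !s.hoth then some "<-->"
    else if s.hoo then some "o-o"
    else if s.hxx then some "x-x"
    else none

-- ===== PRECONDITION & SPEC =====
def Spec_process_graph_entries (entries : List String) (out : Option String) : Prop := out = process_graph_entries_alt entries
instance (entries : List String) (out : Option String) : Decidable (Spec_process_graph_entries entries out) := by unfold Spec_process_graph_entries; infer_instance

-- ===== CLAIM (what is proved, stated in full; the proofs are below) =====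
def Claim_equal_process_graph_entries : Prop := ∀ (entries : List String), Dom_process_graph_entries entries → Spec_process_graph_entries entries (process_graph_entries entries)

-- ===== LEMMAS AND PROOFS =====

-- the skip branch makes the fold over entries equal the fold over the filtered list
theorem pge_fold_filter (l : List String) (s : PgeSt) :
    l.foldl pgeStep s = (l.filter (fun e => e != "")).foldl pgeStep s := by
  induction l generalizing s with
  | nil => rfl
  | cons a t ih =>
    by_cases h : a = ""
    · subst h
      simp [pgeStep, ih]
    · have hne : (a != "") = true := by simpa using h
      simp [hne, List.foldl_cons, ih]

-- per-element characterization of the step once 'first' is set and e ≠ ""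
theorem pge_step_some (e : String) (he : e ≠ "") (a : String) (as l r o oo xx : Bool) :
    pgeStep ⟨some a, as, l, r, o, oo, xx⟩ e =
      ⟨some a, as && (e == a), l || (e == "<--"), r || (e == "-->"),
        o || (!(e == "<--") && !(e == "-->")), oo || (e == "o-o"), xx || (e == "x-x")⟩ := by
  have he' : (e == "") = false := by simpa using he
  by_cases h0 : e = a
  · subst h0
    by_cases h1 : e = "<--"
    · subst h1; simp [pgeStep]
    · by_cases h2 : e = "-->"
      · subst h2; simp [pgeStep]
      · by_cases h3 : e = "o-o"
        · subst h3; simp [pgeStep]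
        · by_cases h4 : e = "x-x"
          · subst h4; simp [pgeStep]
          · simp_all [pgeStep]
  · by_cases h1 : e = "<--"
    · subst h1; simp_all [pgeStep]
    · by_cases h2 : e = "-->"
      · subst h2; simp_all [pgeStep]
      · by_cases h3 : e = "o-o"
        · subst h3; simp_all [pgeStep]
        · by_cases h4 : e = "x-x"
          · subst h4; simp_all [pgeStep]
          · simp_all [pgeStep]

-- the first step, from the initial state, on a non-empty first element
theorem pge_step_none (a : String) (ha : a ≠ "") :
    pgeStep ⟨none, true, false, false, false, false, false⟩ a =
      ⟨some a, true, (a == "<--"), (a == "-->"),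
        (!(a == "<--") && !(a == "-->")), (a == "o-o"), (a == "x-x")⟩ := by
  have he' : (a == "") = false := by simpa using ha
  by_cases h1 : a = "<--"
  · subst h1; simp [pgeStep]
  · by_cases h2 : a = "-->"
    · subst h2; simp [pgeStep]
    · by_cases h3 : a = "o-o"
      · subst h3; simp [pgeStep]
      · by_cases h4 : a = "x-x"
        · subst h4; simp_all [pgeStep]
        · simp_all [pgeStep]

-- the whole tail fold, once 'first' is set, is a pointwise combination of scans
theorem pge_fold_some (t : List String) (ht : ∀ e ∈ t, e ≠ "") (a : String)
    (as l r o oo xx : Bool) :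
    t.foldl pgeStep ⟨some a, as, l, r, o, oo, xx⟩ =
      ⟨some a, as && t.all (fun e => e == a), l || t.any (fun e => e == "<--"),
        r || t.any (fun e => e == "-->"),
        o || t.any (fun e => !(e == "<--") && !(e == "-->")),
        oo || t.any (fun e => e == "o-o"), xx || t.any (fun e => e == "x-x")⟩ := by
  induction t generalizing as l r o oo xx with
  | nil => simp
  | cons e t ih =>
    have he : e ≠ "" := ht e (by simp)
    have ht' : ∀ x ∈ t, x ≠ "" := fun x hx => ht x (by simp [hx])
    rw [List.foldl_cons, pge_step_some e he, ih ht']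
    simp [Bool.and_assoc, Bool.or_assoc]

-- set equality with {'<--','-->'} as boolean scans over a nonempty list
theorem pge_set_eq (a : String) (t : List String) :
    PySem.Set.equal (PySem.Set.ofList (a :: t)) (PySem.Set.ofList ["<--", "-->"]) =
      ((a :: t).any (fun e => e == "<--") && (a :: t).any (fun e => e == "-->") &&
        !((a :: t).any (fun e => !(e == "<--") && !(e == "-->")))) := by
  rw [Bool.eq_iff_iff, PySem.Set.equal_iff]
  constructor
  · intro h
    have hmem : ∀ x, x ∈ a :: t ↔ (x = "<--" ∨ x = "-->") := by
      intro x
      simpa [PySem.Set.mem_ofList] using h x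
    simp only [Bool.and_eq_true, Bool.not_eq_true', List.any_eq_false, List.any_eq_true,
      beq_iff_eq]
    refine ⟨⟨⟨"<--", (hmem _).2 (Or.inl rfl), rfl⟩, ⟨"-->", (hmem _).2 (Or.inr rfl), rfl⟩⟩, ?_⟩
    intro x hx
    rcases (hmem x).1 hx with h1 | h1 <;> simp [h1]
  · intro h
    simp only [Bool.and_eq_true, Bool.not_eq_true', List.any_eq_false, List.any_eq_true,
      beq_iff_eq] at h
    obtain ⟨⟨⟨x1, hx1, e1⟩, ⟨x2, hx2, e2⟩⟩, hall⟩ := h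
    subst e1; subst e2
    intro x
    rw [PySem.Set.mem_ofList, PySem.Set.mem_ofList]
    constructor
    · intro hx
      have hx' := hall x hx
      have hor : x = "<--" ∨ x = "-->" := by
        by_cases hA : x = "<--"
        · exact Or.inl hA
        · right
          by_contra hB
          have hx'' : (x == "<--") = false ∧ (x == "-->") = false → False := by
            simpa using hx'
          exact hx'' ⟨by simpa using hA, by simpa using hB⟩
      rcases hor with h | h <;> simp [h]
    · intro hx
      simp only [List.mem_cons, List.not_mem_nil, or_false] at hx
      rcases hx with h | h <;> (subst h; assumption)

theorem pge_main (entries : List String) :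
    process_graph_entries entries = process_graph_entries_alt entries := by
  unfold process_graph_entries process_graph_entries_alt
  rw [pge_fold_filter]
  cases hf : entries.filter (fun e => e != "") with
  | nil => simp
  | cons a t =>
    have hmem : ∀ e ∈ a :: t, e ≠ "" := by
      intro e he
      have := List.of_mem_filter (hf ▸ he)
      simpa using this
    have ha : a ≠ "" := hmem a (by simp)
    have ht : ∀ e ∈ t, e ≠ "" := fun e he => hmem e (by simp [he])
    rw [List.foldl_cons, pge_step_none a ha, pge_fold_some t ht]
    simp only [List.headD_cons, List.length_cons, List.all_cons, List.any_cons,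
      beq_self_eq_true, Bool.true_and, pge_set_eq]
    by_cases hall : ((a == a) && t.all (fun e => e == a)) = true
    · simp_all
    · have hall' : t.all (fun e => e == a) = false := by
        simpa using hall
      simp only [hall']
      simp only [beq_self_eq_true, Bool.true_and] at hall
      simp

-- ===== VERDICT (by name: the statement is the Claim_ definition above) =====
theorem process_graph_entries_spec : Claim_equal_process_graph_entries := by
  intro entries _
  exact (pge_main entries).symm ▸ rfl
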